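-- pv_equiv track=rewrite | github.com/Si1veR123/Advent-of-Code-2022 | Python/8.py | visible_in_row_method_2
-- ===== SOURCE A (Python) =====
-- def visible_in_row_method_2(row):
--     binary_encoding = 0
--
--     current_max_height = -1
--     for index, tree in enumerate(row):
--         if tree > current_max_height:
--             current_max_height = tree
--             binary_encoding |= (1 << (len(row)-index-1))
--
--     current_max_height = -1
--     for index, tree in enumerate(row[::-1]):
--         if tree > current_max_height:
--             current_max_height = tree
--             binary_encoding |= (1 << index)
--
--     return binary_encoding
-- ===== SOURCE B (Python) =====
-- def visible_in_row_method_2(row):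
--     n = len(row)
--     # suffix maxima: right_of[p] = max height strictly right of p, seeded -1
--     right_of = []
--     running = -1
--     for tree in reversed(row):
--         right_of.append(running)
--         if tree > running:
--             running = tree
--     right_of.reverse()
--
--     result = 0
--     left_max = -1
--     for index, (tree, right_max) in enumerate(zip(row, right_of)):
--         if tree > left_max or tree > right_max:
--             result |= 1 << (n - index - 1)
--         if tree > left_max:
--             left_max = tree
--     return result
-- ===== Notes on version B (the rewrite author's own statement) =====
-- stated objective: alternative
-- what changed: Replaces A's two independent running-max passes (left-to-right and over the reversed row, each OR-ing bits into the result) by a precomputed suffix-maximum table plus a single combined left-to-right pass that sets each bit once from the disjunction 'tree > left running max OR tree > suffix max'.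
import Mathlib
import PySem

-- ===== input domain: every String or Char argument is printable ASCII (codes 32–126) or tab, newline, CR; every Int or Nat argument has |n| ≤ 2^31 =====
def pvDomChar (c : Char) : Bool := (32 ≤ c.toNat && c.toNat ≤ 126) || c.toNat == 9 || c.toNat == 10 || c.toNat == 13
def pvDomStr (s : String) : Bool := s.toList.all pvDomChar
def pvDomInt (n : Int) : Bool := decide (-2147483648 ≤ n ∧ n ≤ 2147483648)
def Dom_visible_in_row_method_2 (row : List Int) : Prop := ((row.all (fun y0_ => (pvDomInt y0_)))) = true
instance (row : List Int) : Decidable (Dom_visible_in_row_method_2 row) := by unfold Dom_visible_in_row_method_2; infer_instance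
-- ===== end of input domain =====

-- B replaces A's two independent running-max passes by a suffix-maximum table plus one
-- combined left-to-right pass (same O(n) cost, a different decomposition).


-- ===== PORT A =====
-- first loop: 'for index, tree in enumerate(row)', bit = len(row)-index-1
def pvLoopA1 : List Int → Nat → Nat → Int → Int → Int × Int
  | [], _, _, enc, cmax => (enc, cmax)
  | tree :: rest, index, n, enc, cmax =>
    if tree > cmax then
      pvLoopA1 rest (index + 1) n (PySem.Int.bor enc ((1 : Int) <<< (n - index - 1))) tree
    else
      pvLoopA1 rest (index + 1) n enc cmax

-- second loop: 'for index, tree in enumerate(row[::-1])', bit = index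
def pvLoopA2 : List Int → Nat → Int → Int → Int × Int
  | [], _, enc, cmax => (enc, cmax)
  | tree :: rest, index, enc, cmax =>
    if tree > cmax then
      pvLoopA2 rest (index + 1) (PySem.Int.bor enc ((1 : Int) <<< index)) tree
    else
      pvLoopA2 rest (index + 1) enc cmax

def visible_in_row_method_2 (row : List Int) : Int :=
  let s1 := pvLoopA1 row 0 row.length 0 (-1)
  -- row[::-1]: PySem.List.slice?_none_none_neg_one says this is some row.reverse (never none)
  let rev := (PySem.List.slice? row none none (-1)).getD []
  (pvLoopA2 rev 0 s1.1 (-1)).1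

-- ===== PORT B =====
-- right-to-left loop building the suffix-maximum list (entry recorded before updating
-- the running max, list prepended = Python's append-then-reverse), plus the final running max
def pvSufLoop : List Int → List Int × Int
  | [] => ([], -1)
  | tree :: rest =>
    let p := pvSufLoop rest
    (p.2 :: p.1, if tree > p.2 then tree else p.2)

-- combined pass over zip(row, right_of)
def pvLoopB : List (Int × Int) → Nat → Nat → Int → Int → Int
  | [], _, _, result, _ => result
  | (tree, rightMax) :: rest, index, n, result, leftMax =>
    let result' := if tree > leftMax ∨ tree > rightMax then
        PySem.Int.bor result ((1 : Int) <<< (n - index - 1)) else result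
    pvLoopB rest (index + 1) n result' (if tree > leftMax then tree else leftMax)

def visible_in_row_method_2_alt (row : List Int) : Int :=
  let n := row.length
  let rightOf := (pvSufLoop row).1
  pvLoopB (row.zip rightOf) 0 n 0 (-1)

-- ===== PRECONDITION & SPEC =====
def Spec_visible_in_row_method_2 (row : List Int) (out : Int) : Prop := out = visible_in_row_method_2_alt row
instance (row : List Int) (out : Int) : Decidable (Spec_visible_in_row_method_2 row out) := by unfold Spec_visible_in_row_method_2; infer_instance

-- ===== CLAIM (what is proved, stated in full; the proofs are below) =====
def Claim_equal_visible_in_row_method_2 : Prop := ∀ (row : List Int), Dom_visible_in_row_method_2 row → Spec_visible_in_row_method_2 row (visible_in_row_method_2 row)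

-- ===== LEMMAS AND PROOFS =====

-- abstract masks (Nat-valued), used only by the proofs
def pvMaskL : List Int → Int → Nat
  | [], _ => 0
  | t :: xs, m => if t > m then (1 <<< xs.length) ||| pvMaskL xs t else pvMaskL xs m

def pvMaskR : List Int → Int → Nat → Nat
  | [], _, _ => 0
  | t :: xs, m, k => if t > m then (1 <<< k) ||| pvMaskR xs t (k + 1) else pvMaskR xs m (k + 1)

def pvSufI (xs : List Int) : Int := xs.foldr max (-1)

def pvMaskS : List Int → Nat
  | [] => 0
  | t :: xs => pvMaskS xs ||| (if t > pvSufI xs then (1 <<< xs.length) else 0)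

def pvMaskC : List Int → Int → Nat
  | [], _ => 0
  | t :: xs, m =>
    (if t > m ∨ t > pvSufI xs then (1 <<< xs.length) else 0) ||| pvMaskC xs (if t > m then t else m)

theorem pv_shift_cast (k : Nat) : (1 : Int) <<< k = ((1 <<< k : Nat) : Int) := by
  simp [Int.shiftLeft_eq, Nat.shiftLeft_eq]

theorem pv_bor_cast (a b : Nat) : PySem.Int.bor (a : Int) (b : Int) = ((a ||| b : Nat) : Int) := by
  simp

theorem pvLoopA1_spec (xs : List Int) : ∀ (i n : Nat) (e : Nat) (m : Int),
    i + xs.length = n → (pvLoopA1 xs i n (e : Int) m).1 = ((e ||| pvMaskL xs m : Nat) : Int) := by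
  induction xs with
  | nil => intro i n e m _; simp [pvLoopA1, pvMaskL]
  | cons t xs ih =>
    intro i n e m h
    have hb : n - i - 1 = xs.length := by simp at h; omega
    by_cases ht : t > m
    · simp only [pvLoopA1, pvMaskL, if_pos ht, hb, pv_shift_cast, pv_bor_cast]
      rw [ih (i + 1) n _ t (by simp at h ⊢; omega)]
      rw [Nat.lor_assoc]
    · simp only [pvLoopA1, pvMaskL, if_neg ht]
      exact ih (i + 1) n e m (by simp at h ⊢; omega)

theorem pvLoopA2_spec (xs : List Int) : ∀ (k : Nat) (e : Nat) (m : Int),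
    (pvLoopA2 xs k (e : Int) m).1 = ((e ||| pvMaskR xs m k : Nat) : Int) := by
  induction xs with
  | nil => intro k e m; simp [pvLoopA2, pvMaskR]
  | cons t xs ih =>
    intro k e m
    by_cases ht : t > m
    · simp only [pvLoopA2, pvMaskR, if_pos ht, pv_shift_cast, pv_bor_cast]
      rw [ih (k + 1) _ t, Nat.lor_assoc]
    · simp only [pvLoopA2, pvMaskR, if_neg ht]
      exact ih (k + 1) e m

theorem pv_if_max (t m : Int) : (if t > m then t else m) = max t m := by
  split <;> omega

theorem pvSufLoop_snd (xs : List Int) : (pvSufLoop xs).2 = pvSufI xs := by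
  induction xs with
  | nil => rfl
  | cons t xs ih =>
    show (if t > (pvSufLoop xs).2 then t else (pvSufLoop xs).2) = pvSufI (t :: xs)
    rw [ih, pv_if_max]
    simp [pvSufI]

theorem pvSufLoop_fst (t : Int) (xs : List Int) :
    (pvSufLoop (t :: xs)).1 = pvSufI xs :: (pvSufLoop xs).1 := by
  simp [pvSufLoop, pvSufLoop_snd]

theorem pvLoopB_spec (xs : List Int) : ∀ (i n : Nat) (e : Nat) (m : Int),
    i + xs.length = n →
    pvLoopB (xs.zip (pvSufLoop xs).1) i n (e : Int) m = ((e ||| pvMaskC xs m : Nat) : Int) := by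
  induction xs with
  | nil => intro i n e m _; simp [pvSufLoop, pvLoopB, pvMaskC]
  | cons t xs ih =>
    intro i n e m h
    have hb : n - i - 1 = xs.length := by simp at h; omega
    rw [pvSufLoop_fst]
    simp only [List.zip_cons_cons, pvLoopB, pvMaskC, hb]
    by_cases hc : t > m ∨ t > pvSufI xs
    · simp only [if_pos hc, pv_shift_cast, pv_bor_cast]
      rw [ih (i + 1) n _ _ (by simp at h ⊢; omega), Nat.lor_assoc]
    · simp only [if_neg hc, Nat.zero_or]
      exact ih (i + 1) n e _ (by simp at h ⊢; omega)

theorem pv_mFold_cons (y : Int) (ys : List Int) (m : Int) :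
    (y :: ys).foldl max m = ys.foldl max (max m y) := rfl

theorem pvMaskR_append (ys : List Int) (t : Int) : ∀ (m : Int) (k : Nat),
    pvMaskR (ys ++ [t]) m k
      = pvMaskR ys m k ||| (if t > ys.foldl max m then 1 <<< (k + ys.length) else 0) := by
  induction ys with
  | nil => intro m k; by_cases h : t > m <;> simp [pvMaskR, h]
  | cons y ys ih =>
    intro m k
    have hlen : k + (y :: ys).length = (k + 1) + ys.length := by simp; omega
    by_cases hy : y > m
    · have hm : max m y = y := by omega
      simp only [pv_mFold_cons, hm, hlen, List.cons_append, pvMaskR, if_pos hy, ih y (k + 1)]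
      rw [Nat.lor_assoc]
    · have hm : max m y = m := by omega
      simp only [pv_mFold_cons, hm, hlen, List.cons_append, pvMaskR, if_neg hy, ih m (k + 1)]

theorem pv_foldl_max_reverse (xs : List Int) (m : Int) :
    xs.reverse.foldl max m = xs.foldr max m := by
  rw [List.foldl_reverse]
  congr 1
  funext a b
  exact max_comm b a

theorem pvMaskR_reverse (xs : List Int) : pvMaskR xs.reverse (-1) 0 = pvMaskS xs := by
  induction xs with
  | nil => rfl
  | cons t xs ih =>
    rw [show (t :: xs).reverse = xs.reverse ++ [t] by simp]
    rw [pvMaskR_append, ih, pv_foldl_max_reverse]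
    simp [pvMaskS, pvSufI]

theorem pv_lor_absorb (a b c : Nat) : (a ||| b) ||| (c ||| a) = a ||| (b ||| c) := by
  rw [Nat.lor_comm c a, ← Nat.lor_assoc, Nat.lor_assoc a b a, Nat.lor_comm b a,
    ← Nat.lor_assoc, Nat.or_self, Nat.lor_assoc]

theorem pvMaskC_eq (xs : List Int) : ∀ (m : Int),
    pvMaskL xs m ||| pvMaskS xs = pvMaskC xs m := by
  induction xs with
  | nil => intro m; simp [pvMaskL, pvMaskS, pvMaskC]
  | cons t xs ih =>
    intro m
    by_cases ht : t > m
    · have hc : t > m ∨ t > pvSufI xs := Or.inl ht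
      simp only [pvMaskL, pvMaskS, pvMaskC, if_pos ht, if_pos hc, ← ih t]
      by_cases hs : t > pvSufI xs
      · rw [if_pos hs, pv_lor_absorb]
      · rw [if_neg hs, Nat.or_zero, Nat.lor_assoc]
    · simp only [pvMaskL, pvMaskS, pvMaskC, if_neg ht, ← ih m]
      have hc : (t > m ∨ t > pvSufI xs) ↔ t > pvSufI xs := by tauto
      rw [← Nat.lor_assoc]
      by_cases hs : t > pvSufI xs
      · rw [if_pos hs, if_pos (hc.mpr hs), Nat.lor_comm _ (1 <<< xs.length)]
      · rw [if_neg hs, if_neg (by tauto), Nat.or_zero, Nat.zero_or]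

-- ===== VERDICT (by name: the statement is the Claim_ definition above) =====
theorem visible_in_row_method_2_spec : Claim_equal_visible_in_row_method_2 := by
  intro row _
  unfold Spec_visible_in_row_method_2 visible_in_row_method_2 visible_in_row_method_2_alt
  simp only [PySem.List.slice?_none_none_neg_one, Option.getD_some]
  rw [show ((0 : Int)) = ((0 : Nat) : Int) by rfl]
  rw [pvLoopA1_spec row 0 row.length 0 (-1) (by simp)]
  rw [pvLoopA2_spec row.reverse 0 _ (-1)]
  rw [pvLoopB_spec row 0 row.length 0 (-1) (by simp)]
  rw [pvMaskR_reverse, Nat.zero_or, Nat.zero_or, pvMaskC_eq]
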